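-- pv_equiv track=rewrite | github.com/The-Full-Stack-Code-Meetups/coding-problems | python/problem-12/script.py | first_recurring
-- ===== SOURCE A (Python) =====
-- def first_recurring(string):
--     for i in range(0, len(string)-1):
--         curr_element = string[i]
--         next_element = string[i+1]
--         if curr_element == next_element:
--             return curr_element
--     else:
--         return None
-- ===== SOURCE B (Python) =====
-- def _rle(s):
--     # run-length encode s into a list of (element, run_length) pairs
--     runs = []
--     i = 0
--     while i < len(s):
--         j = i + 1
--         while j < len(s) and s[j] == s[i]:
--             j += 1
--         runs.append((s[i], j - i))
--         i = j
--     return runs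
--
-- def first_recurring(string):
--     for ch, cnt in _rle(string):
--         if cnt >= 2:
--             return ch
--     return None
-- ===== Notes on version B (the rewrite author's own statement) =====
-- stated objective: alternative
-- what changed: Two staged passes over a run-length encoding: B first compresses the string into (char, run_length) pairs, then returns the character of the first run of length >= 2, instead of A's single index loop comparing each adjacent pair.
import Mathlib
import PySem

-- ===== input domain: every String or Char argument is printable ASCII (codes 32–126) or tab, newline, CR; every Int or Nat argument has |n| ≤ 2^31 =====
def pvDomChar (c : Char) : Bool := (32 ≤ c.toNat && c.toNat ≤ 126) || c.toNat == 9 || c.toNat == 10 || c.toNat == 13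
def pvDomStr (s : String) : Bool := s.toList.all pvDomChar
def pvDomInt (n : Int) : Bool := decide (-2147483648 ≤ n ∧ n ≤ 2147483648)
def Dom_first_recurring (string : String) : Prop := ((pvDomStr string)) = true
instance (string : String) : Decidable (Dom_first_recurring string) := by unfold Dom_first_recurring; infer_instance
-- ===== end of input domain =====

-- B recomputes the result in two staged passes over a run-length encoding (compress into (char, run_length) pairs, then pick the first run of length ≥ 2) instead of A's index loop over adjacent pairs; return value only, no side effects.
-- ===== PORT A =====
-- the 'for i in range(0, len(string)-1)' loop, step for step; the none fallback for pyGet? is unreachable (indices are in range)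
def pvALoop (cs : List Char) : List Int → Option String
  | [] => none
  | i :: rest =>
    match PySem.List.pyGet? cs i, PySem.List.pyGet? cs (i + 1) with
    | some c, some n => if c = n then some (String.ofList [c]) else pvALoop cs rest
    | _, _ => none

def first_recurring (string : String) : Option String :=
  pvALoop string.toList (PySem.List.pyRange 0 ((string.toList.length : Int) - 1) 1)

-- ===== PORT B =====
-- inner 'while j < len(s) and s[j] == s[i]' of _rle: length of the prefix equal to c
def pvCountEq (c : Char) : List Char → Nat
  | d :: rest => if d = c then pvCountEq c rest + 1 else 0
  | [] => 0

-- outer while of _rle: one run per step, the loop index i advancing to j is the drop of the counted prefix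
def pvRle : List Char → List (Char × Nat)
  | [] => []
  | c :: rest => (c, 1 + pvCountEq c rest) :: pvRle (rest.drop (pvCountEq c rest))
termination_by cs => cs.length
decreasing_by simp

-- the 'for ch, cnt in _rle(string)' loop of first_recurring in Source B
def pvFind : List (Char × Nat) → Option String
  | [] => none
  | (c, n) :: rest => if 2 ≤ n then some (String.ofList [c]) else pvFind rest

def first_recurring_alt (string : String) : Option String :=
  pvFind (pvRle string.toList)

-- ===== PRECONDITION & SPEC =====
def Spec_first_recurring (string : String) (out : Option String) : Prop := out = first_recurring_alt string
instance (string : String) (out : Option String) : Decidable (Spec_first_recurring string out) := by unfold Spec_first_recurring; infer_instance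

-- ===== CLAIM (what is proved, stated in full; the proofs are below) =====
def Claim_equal_first_recurring : Prop := ∀ (string : String), Dom_first_recurring string → Spec_first_recurring string (first_recurring string)

-- ===== LEMMAS AND PROOFS =====

-- common reference form: direct left-to-right scan for the first equal adjacent pair
def pvScan : List Char → Option String
  | a :: b :: rest => if a = b then some (String.ofList [a]) else pvScan (b :: rest)
  | _ => none

-- loop invariant for A: from index k on, A's loop computes the scan of the suffix
theorem pvLoop_eq_scan (cs : List Char) (k : Nat) :
    pvALoop cs (PySem.List.pyRange (k : Int) ((cs.length : Int) - 1) 1) = pvScan (cs.drop k) := by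
  by_cases h : (k : Int) < (cs.length : Int) - 1
  · rw [PySem.List.pyRange_one_cons h]
    have hk : k < cs.length := by omega
    have hk1 : k + 1 < cs.length := by omega
    have h1 : PySem.List.pyGet? cs (k : Int) = some cs[k] := PySem.List.pyGet?_ofNat cs k hk
    have h2 : PySem.List.pyGet? cs ((k : Int) + 1) = some cs[k + 1] := by
      have := PySem.List.pyGet?_ofNat cs (k+1) hk1
      simpa [Nat.cast_add] using this
    have hd : cs.drop k = cs[k] :: cs.drop (k + 1) := List.drop_eq_getElem_cons hk
    have hd1 : cs.drop (k + 1) = cs[k + 1] :: cs.drop (k + 2) := List.drop_eq_getElem_cons hk1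
    rw [hd, hd1]
    have hcast : (k : Int) + 1 = ((k + 1 : Nat) : Int) := by push_cast; ring
    rw [pvALoop, h1, h2]
    by_cases hc : cs[k] = cs[k + 1]
    · simp [pvScan, hc]
    · simp only [hc, if_false]
      rw [hcast, pvLoop_eq_scan cs (k + 1), hd1]
      simp [pvScan, hc]
  · rw [PySem.List.pyRange_one_eq_nil (by omega)]
    have : cs.length ≤ k + 1 := by omega
    rcases Nat.lt_or_ge k cs.length with hlt | hge
    · have : cs.drop k = [cs[k]] := by
        have := List.drop_eq_getElem_cons hlt
        rw [this, List.drop_eq_nil_of_le (by omega)]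
      rw [this]; rfl
    · rw [List.drop_eq_nil_of_le hge]; rfl
termination_by cs.length - k

-- B's staged RLE search computes the same scan
theorem pvFind_rle_eq_scan : ∀ cs : List Char, pvFind (pvRle cs) = pvScan cs
  | [] => by rw [pvRle.eq_def]; rfl
  | [c] => by rw [pvRle.eq_def]; simp [pvCountEq, pvFind, pvScan, pvRle.eq_def]
  | c :: d :: rest => by
    by_cases h : d = c
    · subst h
      rw [pvRle.eq_def]
      have : 2 ≤ 1 + pvCountEq d (d :: rest) := by simp [pvCountEq]; omega
      simp [pvFind, this, pvScan]
    · have h0 : pvCountEq c (d :: rest) = 0 := by simp [pvCountEq, h]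
      rw [pvRle.eq_def]; simp only [h0]
      simp only [List.drop_zero, pvFind]
      rw [if_neg (by omega), pvFind_rle_eq_scan (d :: rest)]
      simp only [pvScan]
      rw [if_neg (fun hcd => h hcd.symm)]
termination_by cs => cs.length

-- ===== VERDICT =====
theorem first_recurring_spec : Claim_equal_first_recurring := by
  intro s _
  unfold Spec_first_recurring first_recurring first_recurring_alt
  rw [pvFind_rle_eq_scan]
  simpa using pvLoop_eq_scan s.toList 0
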